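-- pv_equiv track=rewrite | github.com/diegog81/Parcial-Tecnicas-Programacion | ejercicio_2.py | botesNoHundidos
-- ===== SOURCE A (Python) =====
-- def mapaDeDisparos(life,disparo):
--     lista = []
--     for f in range(len(life)):
--         fila = []
--         for c in range(len(life[0])):
--             fila.append(crearFilaColumna(life,f,c,disparo))
--         lista.append(fila)
--     return lista
--
-- def crearFilaColumna(life,f,c,disparo):
--
--     for x in range(len(disparo)):
--
--         fila = (disparo[x][0])-1
--         columna = (disparo[x][1])-1
--         if f == fila and c == columna:
--             return '.'
--     return life[f][c]
--
-- def botesNoHundidos(mapa, posicionesDeDisparosDePrueba):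
--     lista1 = []
--     for x in range(1, len(mapa)):
--         if len(mapa[x - 1]) != len(mapa[x]):
--             return lista1
--     lista = mapaDeDisparos(mapa,posicionesDeDisparosDePrueba)
--     lista2 = []
--     for f in range(len(lista)):
--         lista3 = ()
--         for c in range(len(lista[0])):
--             if lista[f][c] == 'b':
--                 lista3 = (f+1,c+1)
--             if lista != [] and len(lista3) == 2:
--                 lista2.append(lista3)
--                 lista3 = []
--     return lista2
-- ===== SOURCE B (Python) =====
-- def botesNoHundidos(mapa, posicionesDeDisparosDePrueba):
--     if any(len(mapa[i]) != len(mapa[i + 1]) for i in range(len(mapa) - 1)):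
--         return []
--     shots = {(d[0], d[1]) for d in posicionesDeDisparosDePrueba}
--     return [(f + 1, c + 1)
--             for f, row in enumerate(mapa)
--             for c, val in enumerate(row)
--             if val == 'b' and (f + 1, c + 1) not in shots]
-- ===== Notes on version B (the rewrite author's own statement) =====
-- stated objective: faster
-- what changed: B drops A's intermediate shot-masked grid and per-cell tuple state machine: it builds a set of shot coordinates once and emits the non-hit 'b' cells in a single row-major comprehension, removing the per-cell rescan of the shot list.
import Mathlib
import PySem

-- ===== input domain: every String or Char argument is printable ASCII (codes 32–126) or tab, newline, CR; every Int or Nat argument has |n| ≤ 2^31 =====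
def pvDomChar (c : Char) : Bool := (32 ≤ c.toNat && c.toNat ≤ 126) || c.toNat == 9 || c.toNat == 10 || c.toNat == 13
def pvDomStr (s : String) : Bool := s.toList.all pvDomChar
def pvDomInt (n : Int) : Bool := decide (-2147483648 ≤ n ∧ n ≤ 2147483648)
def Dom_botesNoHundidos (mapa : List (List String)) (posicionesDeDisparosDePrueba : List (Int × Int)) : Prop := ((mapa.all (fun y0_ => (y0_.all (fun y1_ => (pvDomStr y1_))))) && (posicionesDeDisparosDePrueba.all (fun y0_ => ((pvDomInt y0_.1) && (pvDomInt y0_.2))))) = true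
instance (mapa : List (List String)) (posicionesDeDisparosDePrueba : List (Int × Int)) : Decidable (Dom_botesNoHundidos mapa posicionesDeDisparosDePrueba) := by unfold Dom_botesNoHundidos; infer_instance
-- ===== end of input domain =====

-- B replaces A's shot-masked intermediate grid and per-cell tuple state machine by a one-pass
-- comprehension over a prebuilt set of shot coordinates (objective: simpler).


-- ===== PORT A =====
def crearFilaColumnaGo (life : List (List String)) (f c : Nat) : List (Int × Int) → String
  | [] => (life.getD f []).getD c ""
  | d :: rest =>
      if (f : Int) = d.1 - 1 ∧ (c : Int) = d.2 - 1 then "." else crearFilaColumnaGo life f c rest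

def crearFilaColumna (life : List (List String)) (f c : Nat) (disparo : List (Int × Int)) : String :=
  crearFilaColumnaGo life f c disparo

def mapaDeDisparos (life : List (List String)) (disparo : List (Int × Int)) : List (List String) :=
  (List.range life.length).map fun f =>
    (List.range (life.getD 0 []).length).map fun c => crearFilaColumna life f c disparo

def bnhGuard : List (List String) → Bool
  | a :: b :: rest => if a.length ≠ b.length then false else bnhGuard (b :: rest)
  | _ => true

def bnhStep (lista : List (List String)) (f : Nat)
    (st : List (Int × Int) × Option (Int × Int)) (c : Nat) :
    List (Int × Int) × Option (Int × Int) :=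
  let lista3 : Option (Int × Int) :=
    if (lista.getD f []).getD c "" = "b" then some ((f : Int) + 1, (c : Int) + 1) else st.2
  if lista.isEmpty = false ∧ lista3.isSome = true then (st.1 ++ lista3.toList, none)
  else (st.1, lista3)

def botesNoHundidos (mapa : List (List String)) (posicionesDeDisparosDePrueba : List (Int × Int)) : List (Int × Int) :=
  if bnhGuard mapa = false then []
  else
    let lista := mapaDeDisparos mapa posicionesDeDisparosDePrueba
    (List.range lista.length).foldl
      (fun lista2 f => ((List.range (lista.getD 0 []).length).foldl (bnhStep lista f) (lista2, none)).1)
      []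

-- ===== PORT B =====
def botesNoHundidos_alt (mapa : List (List String)) (posicionesDeDisparosDePrueba : List (Int × Int)) : List (Int × Int) :=
  if (List.range (mapa.length - 1)).any
      (fun i => (mapa.getD i []).length ≠ (mapa.getD (i + 1) []).length) then []
  else
    let shots : PySem.Set (Int × Int) := PySem.Set.ofList posicionesDeDisparosDePrueba
    (PySem.List.enumerate mapa).flatMap fun fr =>
      (PySem.List.enumerate fr.2).filterMap fun cv =>
        if cv.2 = "b" ∧ PySem.Set.contains shots (fr.1 + 1, cv.1 + 1) = false
        then some (fr.1 + 1, cv.1 + 1) else none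

-- ===== PRECONDITION & SPEC =====
def Spec_botesNoHundidos (mapa : List (List String)) (posicionesDeDisparosDePrueba : List (Int × Int)) (out : List (Int × Int)) : Prop := out = botesNoHundidos_alt mapa posicionesDeDisparosDePrueba
instance (mapa : List (List String)) (posicionesDeDisparosDePrueba : List (Int × Int)) (out : List (Int × Int)) : Decidable (Spec_botesNoHundidos mapa posicionesDeDisparosDePrueba out) := by unfold Spec_botesNoHundidos; infer_instance

-- ===== CLAIM (what is proved, stated in full; the proofs are below) =====
def Claim_equal_botesNoHundidos : Prop := ∀ (mapa : List (List String)) (posicionesDeDisparosDePrueba : List (Int × Int)), Dom_botesNoHundidos mapa posicionesDeDisparosDePrueba → Spec_botesNoHundidos mapa posicionesDeDisparosDePrueba (botesNoHundidos mapa posicionesDeDisparosDePrueba)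

-- ===== LEMMAS AND PROOFS =====

theorem bnh_flatMap_congr {α β : Type} (l : List α) (f g : α → List β)
    (h : ∀ a ∈ l, f a = g a) : l.flatMap f = l.flatMap g := by
  induction l with
  | nil => rfl
  | cons a t ih =>
      simp only [List.flatMap_cons]
      rw [h a (by simp), ih (fun a ha => h a (by simp [ha]))]

theorem bnh_filterMap_congr {α β : Type} (l : List α) (f g : α → Option β)
    (h : ∀ a ∈ l, f a = g a) : l.filterMap f = l.filterMap g := by
  induction l with
  | nil => rfl
  | cons a t ih =>
      simp only [List.filterMap_cons]
      rw [h a (by simp), ih (fun a ha => h a (by simp [ha]))]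

-- the guards agree
theorem guard_eq (mapa : List (List String)) :
    ((List.range (mapa.length - 1)).any
      (fun i => (mapa.getD i []).length ≠ (mapa.getD (i + 1) []).length)) = !bnhGuard mapa := by
  induction mapa with
  | nil => rfl
  | cons a t ih =>
      cases t with
      | nil => rfl
      | cons b t' =>
          have hlen : (a :: b :: t').length - 1 = ((b :: t').length - 1) + 1 := by
            simp [List.length_cons]
          rw [hlen, List.range_succ_eq_map]
          simp only [List.any_cons, List.any_map, Function.comp_def, Nat.succ_eq_add_one]
          have h1 : ∀ i : Nat, ((a :: b :: t').getD (i + 1) []) = ((b :: t').getD i []) := by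
            intro i; rfl
          simp only [h1]
          rw [ih]
          simp only [bnhGuard, List.getD_cons_zero]
          by_cases h : a.length = b.length <;> simp [h]

-- under the guard all rows have the head row's length
theorem guard_len (a : List String) (t : List (List String)) (hg : bnhGuard (a :: t) = true) :
    ∀ y ∈ a :: t, y.length = a.length := by
  induction t generalizing a with
  | nil => intro y hy; simp at hy; simp [hy]
  | cons b t' ih =>
      have hab : a.length = b.length := by
        by_contra h; simp [bnhGuard, h] at hg
      have hg' : bnhGuard (b :: t') = true := by
        simpa [bnhGuard, hab] using hg
      intro y hy
      rcases List.mem_cons.mp hy with rfl | hy'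
      · rfl
      · rw [ih b hg' y hy', hab]

-- crearFilaColumna in closed form
theorem crear_eq (life : List (List String)) (f c : Nat) (disparo : List (Int × Int)) :
    crearFilaColumnaGo life f c disparo =
      if ∃ d ∈ disparo, (f : Int) = d.1 - 1 ∧ (c : Int) = d.2 - 1 then "."
      else (life.getD f []).getD c "" := by
  induction disparo with
  | nil => simp [crearFilaColumnaGo]
  | cons d rest ih =>
      by_cases h : (f : Int) = d.1 - 1 ∧ (c : Int) = d.2 - 1
      · simp [crearFilaColumnaGo, h]
      · rw [crearFilaColumnaGo, if_neg h, ih]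
        simp only [List.exists_mem_cons_iff]
        by_cases h2 : ∃ d ∈ rest, (f : Int) = d.1 - 1 ∧ (c : Int) = d.2 - 1 <;> simp [h, h2]

-- inner loop of A
theorem inner_eq (lista : List (List String)) (hl : lista.isEmpty = false) (f : Nat)
    (cs : List Nat) (acc : List (Int × Int)) :
    cs.foldl (bnhStep lista f) (acc, none) =
      (acc ++ cs.filterMap (fun c =>
        if (lista.getD f []).getD c "" = "b" then some ((f : Int) + 1, (c : Int) + 1) else none),
       none) := by
  induction cs generalizing acc with
  | nil => simp
  | cons c rest ih =>
      by_cases h : (lista.getD f []).getD c "" = "b" <;>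
        simp only [List.getD_eq_getElem?_getD] at h ih ⊢ <;>
        simp [bnhStep, hl, h, ih]

-- outer loop of A as a flatMap
theorem outer_eq (lista : List (List String)) (hl : lista.isEmpty = false) (w : Nat)
    (fs : List Nat) (acc : List (Int × Int)) :
    fs.foldl (fun lista2 f => ((List.range w).foldl (bnhStep lista f) (lista2, none)).1) acc =
      acc ++ fs.flatMap (fun f => (List.range w).filterMap (fun c =>
        if (lista.getD f []).getD c "" = "b" then some ((f : Int) + 1, (c : Int) + 1) else none)) := by
  induction fs generalizing acc with
  | nil => simp
  | cons f rest ih =>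
      simp only [List.foldl_cons, List.flatMap_cons]
      rw [inner_eq lista hl f (List.range w) acc, ih]
      simp

-- enumerate → range, flatMap form
theorem enum_flat (xs : List (List String)) (k : Nat) (g : Int → List String → List (Int × Int)) :
    (PySem.List.enumerate xs (k : Int)).flatMap (fun p => g p.1 p.2) =
      (List.range xs.length).flatMap (fun j => g ((k + j : Nat) : Int) (xs.getD j [])) := by
  induction xs generalizing k with
  | nil => simp [PySem.List.enumerate_nil]
  | cons x t ih =>
      rw [PySem.List.enumerate_cons, List.flatMap_cons]
      have hk : ((k : Int) + 1) = ((k + 1 : Nat) : Int) := by push_cast; ring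
      rw [hk, ih (k + 1)]
      have htail : (List.range t.length).flatMap (fun j => g ((k + 1 + j : Nat) : Int) (t.getD j [])) =
          (List.range t.length).flatMap (fun a => g ((k + (a + 1) : Nat) : Int) ((x :: t).getD (a + 1) [])) := by
        apply bnh_flatMap_congr; intro j _
        simp only [List.getD_cons_succ]
        congr 1; omega
      rw [htail]
      conv_rhs => rw [List.length_cons, List.range_succ_eq_map, List.flatMap_cons, List.flatMap_map]
      simp only [Nat.succ_eq_add_one, Nat.add_zero, List.getD_cons_zero]

-- enumerate → range, filterMap form
theorem enum_filt (xs : List String) (k : Nat) (g : Int → String → Option (Int × Int)) :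
    (PySem.List.enumerate xs (k : Int)).filterMap (fun p => g p.1 p.2) =
      (List.range xs.length).filterMap (fun j => g ((k + j : Nat) : Int) (xs.getD j "")) := by
  induction xs generalizing k with
  | nil => simp [PySem.List.enumerate_nil]
  | cons x t ih =>
      rw [PySem.List.enumerate_cons, List.filterMap_cons]
      have hk : ((k : Int) + 1) = ((k + 1 : Nat) : Int) := by push_cast; ring
      rw [hk, ih (k + 1)]
      have htail : (List.range t.length).filterMap (fun j => g ((k + 1 + j : Nat) : Int) (t.getD j "")) =
          (List.range t.length).filterMap (fun a => g ((k + (a + 1) : Nat) : Int) ((x :: t).getD (a + 1) "")) := by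
        apply bnh_filterMap_congr; intro j _
        simp only [List.getD_cons_succ]
        congr 1; omega
      rw [htail]
      conv_rhs => rw [List.length_cons, List.range_succ_eq_map, List.filterMap_cons, List.filterMap_map]
      simp only [Function.comp_def, Nat.succ_eq_add_one, Nat.add_zero, List.getD_cons_zero]

-- ===== VERDICT (by name: the statement is the Claim_ definition above) =====
theorem botesNoHundidos_spec : Claim_equal_botesNoHundidos := by
  unfold Claim_equal_botesNoHundidos
  intro mapa shots _
  unfold Spec_botesNoHundidos
  by_cases hg : bnhGuard mapa = true
  case neg =>
    have hg' : bnhGuard mapa = false := by revert hg; cases bnhGuard mapa <;> simp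
    have hB : ((List.range (mapa.length - 1)).any
        (fun i => (mapa.getD i []).length ≠ (mapa.getD (i + 1) []).length)) = true := by
      rw [guard_eq, hg']; rfl
    have e1 : botesNoHundidos mapa shots = [] := by
      simp only [botesNoHundidos]; rw [if_pos hg']
    have e2 : botesNoHundidos_alt mapa shots = [] := by
      simp only [botesNoHundidos_alt]; rw [if_pos hB]
    rw [e1, e2]
  case pos =>
    have hB : ((List.range (mapa.length - 1)).any
        (fun i => (mapa.getD i []).length ≠ (mapa.getD (i + 1) []).length)) = false := by
      rw [guard_eq, hg]; rfl
    cases mapa with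
    | nil =>
        simp [botesNoHundidos, botesNoHundidos_alt, mapaDeDisparos, PySem.List.enumerate_nil,
          bnhGuard]
    | cons a t =>
        have hlist : (mapaDeDisparos (a :: t) shots).length = t.length + 1 := by
          simp [mapaDeDisparos]
        have hl : (mapaDeDisparos (a :: t) shots).isEmpty = false := by
          cases hml : mapaDeDisparos (a :: t) shots with
          | nil => rw [hml] at hlist; simp at hlist
          | cons u v => rfl
        have hrow : ∀ f : Nat, f < t.length + 1 →
            (mapaDeDisparos (a :: t) shots).getD f [] =
              (List.range a.length).map (fun c => crearFilaColumna (a :: t) f c shots) := by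
          intro f hf
          simp [mapaDeDisparos, List.getD_eq_getElem?_getD, hf]
        have hw : ((mapaDeDisparos (a :: t) shots).getD 0 []).length = a.length := by
          rw [hrow 0 (Nat.succ_pos _)]; simp
        have hrlen : ∀ f : Nat, f < t.length + 1 → ((a :: t).getD f []).length = a.length := by
          intro f hf
          have hfl : f < (a :: t).length := by simpa using hf
          simp only [List.getD_eq_getElem?_getD, List.getElem?_eq_getElem hfl, Option.getD_some]
          exact guard_len a t hg _ (List.getElem_mem hfl)
        have hA : botesNoHundidos (a :: t) shots =
            (List.range (t.length + 1)).flatMap (fun f =>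
              (List.range a.length).filterMap (fun c =>
                if crearFilaColumna (a :: t) f c shots = "b"
                then some ((f : Int) + 1, (c : Int) + 1) else none)) := by
          simp only [botesNoHundidos, hg]
          rw [if_neg (by simp)]
          rw [hlist, hw, outer_eq _ hl, List.nil_append]

          apply bnh_flatMap_congr; intro f hf
          rw [List.mem_range] at hf
          apply bnh_filterMap_congr; intro c hc
          rw [List.mem_range] at hc
          rw [hrow f hf]
          simp [List.getD_eq_getElem?_getD, hc]
        have hB2 : botesNoHundidos_alt (a :: t) shots =
            (List.range (t.length + 1)).flatMap (fun f =>
              (List.range a.length).filterMap (fun c =>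
                if ((a :: t).getD f []).getD c "" = "b" ∧
                    PySem.Set.contains (PySem.Set.ofList shots) ((f : Int) + 1, (c : Int) + 1) = false
                then some ((f : Int) + 1, (c : Int) + 1) else none)) := by
          simp only [botesNoHundidos_alt]
          rw [if_neg (by simp only [hB]; simp)]
          have h0 : PySem.List.enumerate (a :: t) (0 : Int) =
              PySem.List.enumerate (a :: t) ((0 : Nat) : Int) := by norm_num
          rw [h0]
          have hf1 := enum_flat (a :: t) 0 (fun f row =>
            (PySem.List.enumerate row).filterMap (fun cv =>
              if cv.2 = "b" ∧
                  PySem.Set.contains (PySem.Set.ofList shots) (f + 1, cv.1 + 1) = false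
              then some (f + 1, cv.1 + 1) else none))
          beta_reduce at hf1
          rw [hf1]
          simp only [Nat.zero_add, List.length_cons]
          apply bnh_flatMap_congr; intro f hf
          rw [List.mem_range] at hf
          have h0' : PySem.List.enumerate ((a :: t).getD f []) (0 : Int) =
              PySem.List.enumerate ((a :: t).getD f []) ((0 : Nat) : Int) := by norm_num
          rw [h0']
          have hf2 := enum_filt ((a :: t).getD f []) 0 (fun ci v =>
            if v = "b" ∧
                PySem.Set.contains (PySem.Set.ofList shots) ((f : Int) + 1, ci + 1) = false
            then some ((f : Int) + 1, ci + 1) else none)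
          beta_reduce at hf2
          rw [hf2, hrlen f hf]
          simp only [Nat.zero_add]
        rw [hA, hB2]
        apply bnh_flatMap_congr; intro f hf
        rw [List.mem_range] at hf
        apply bnh_filterMap_congr; intro c _
        rw [show crearFilaColumna (a :: t) f c shots = crearFilaColumnaGo (a :: t) f c shots from rfl,
          crear_eq]
        by_cases hs : ∃ d ∈ shots, (f : Int) = d.1 - 1 ∧ (c : Int) = d.2 - 1
        · have hit : ((f : Int) + 1, (c : Int) + 1) ∈ shots := by
            obtain ⟨⟨d1, d2⟩, hd, h1, h2⟩ := hs
            dsimp only at h1 h2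
            have e1 : d1 = (f : Int) + 1 := by omega
            have e2 : d2 = (c : Int) + 1 := by omega
            subst e1; subst e2; exact hd
          simp [hs, hit]
        · have hnot : ((f : Int) + 1, (c : Int) + 1) ∉ shots := by
            intro hd
            exact hs ⟨((f : Int) + 1, (c : Int) + 1), hd,
              by show (f : Int) = ((f : Int) + 1) - 1; ring,
              by show (c : Int) = ((c : Int) + 1) - 1; ring⟩
          simp [hs, hnot]
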